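-- pv_equiv track=rewrite | github.com/ruais/nim_tools | nim_tools/__init__.py | nimwin
-- ===== SOURCE A (Python) =====
-- from typing import Tuple, Union
--
-- def nimwin(piles: Tuple[int, ...], misere: bool = False) -> Tuple[int, tuple]:
--     '''
--     Calculate the possible moves to have control in a game of Nim.
--
--     Keyword arguments:
--     piles  -- a tuple of ints: each represents an amount of tokens in a pile
--     misere -- gamemode:
--                   False if the aim is to take the last token
--                   True if the aim is to leave one token for the opponent
--                   (default False)
--
--     Returns:
--     sub  -- the positive int of tokens to remove from a pile to keep control
--     opts -- a tuple of ints: each is the index of a pile $sub can be subbed from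
--         if there is no move to take control (sub == 0), $opts returns empty
--
--     Examples:
--     -- $misere will not affect scenarios until endgame is reached
--     >>> nimwin((4, 2, 1))
--     (1, (0,))
--     >>> nimwin((4, 2, 1), misere = True)
--     (1, (0,))
--     >>> nimwin((6, 6, 2, 1))
--     (1, (0, 1, 2))
--     >>> nimwin((6, 6, 2, 1), misere = True)
--     (1, (0, 1, 2))
--     >>> nimwin((2, 2))
--     (0, ())
--     >>> nimwin((2, 2), misere = True)
--     (0, ())
--
--     -- during endgame, $misere corrects $sub for changed win condition
--     >>> nimwin((1, 2, 1))
--     (2, (1,))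
--     >>> nimwin((1, 2, 1), misere = True)
--     (1, (1,))
--     >>> nimwin((1, 1))
--     (0, ())
--     >>> nimwin((1, 1), misere = True)
--     (1, (0, 1))
--     '''
--     from functools import reduce
--
--     # endgame is reached when all future moves remove the last token in a pile
--     endgame = sum(1 for p in piles if p > 1) <= 1
--     misere = misere and endgame
--     if misere and sum(1 for p in piles if p > 0) % 2:
--         misere = -1
--
--     sub = reduce(lambda i, j: i ^ j, piles)
--
--     opts = []
--     if sub + misere:
--         abjunct = sub
--         for i, p in enumerate(piles):
--             # match = sub NIMPLY p
--             match = sub & ~p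
--             if match < abjunct:
--                 abjunct = match
--                 opts = []
--             if match == abjunct:
--                 opts.append(i)
--
--         sub -= 2 * abjunct
--
--     sub += misere
--     opts = tuple(opts)
--
--     return sub, opts
-- ===== SOURCE B (Python) =====
-- def nimwin(piles, misere=False):
--     from functools import reduce
--
--     # endgame is reached when all future moves remove the last token in a pile
--     endgame = sum(1 for p in piles if p > 1) <= 1
--     misere = misere and endgame
--     if misere and sum(1 for p in piles if p > 0) % 2:
--         misere = -1
--
--     sub = reduce(lambda i, j: i ^ j, piles)
--
--     opts = ()
--     if sub + misere:
--         # two-pass selection: materialise all candidates, take the minimum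
--         # (seeded with sub, the loop's initial bound), then collect its indices
--         matches = [sub & ~p for p in piles]
--         m = min([sub] + matches)
--         opts = tuple(i for i, x in enumerate(matches) if x == m)
--         sub -= 2 * m
--
--     sub += misere
--     return sub, opts
-- ===== Notes on version B (the rewrite author's own statement) =====
-- stated objective: alternative
-- what changed: Replaces A's single-pass running-argmin loop (reset opts on a strictly smaller match, append on ties) with a two-pass computation: build all match candidates, take their minimum (seeded with sub, the loop's initial bound), then collect the indices attaining it.
-- outside the precondition, e.g. on nimwin((), False): A raises TypeError, B raises TypeError
import Mathlib
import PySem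

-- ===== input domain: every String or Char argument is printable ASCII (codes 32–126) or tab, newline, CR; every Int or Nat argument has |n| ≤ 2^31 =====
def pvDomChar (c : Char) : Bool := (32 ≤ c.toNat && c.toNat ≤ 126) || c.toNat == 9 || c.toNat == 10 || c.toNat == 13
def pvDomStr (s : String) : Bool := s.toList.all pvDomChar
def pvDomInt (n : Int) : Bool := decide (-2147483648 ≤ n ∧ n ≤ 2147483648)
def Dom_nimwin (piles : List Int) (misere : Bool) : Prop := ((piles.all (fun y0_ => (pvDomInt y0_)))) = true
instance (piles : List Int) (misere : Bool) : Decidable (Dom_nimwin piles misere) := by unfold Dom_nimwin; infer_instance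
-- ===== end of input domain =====

-- B replaces A's single-pass running-argmin loop (reset-on-smaller, append-on-tie) by a
-- two-pass computation: build all candidates, take their minimum, then collect its indices
-- (objective: simpler/alternative decomposition, same cost).

-- ===== PORT A =====
-- sub = reduce(lambda i, j: i ^ j, piles): raises TypeError on [] (excluded by Pre_), 0 is a dummy.
-- This line is identical in A and B, so both ports share it.
def pyReduceXor (piles : List Int) : Int :=
  match piles with
  | [] => 0
  | h :: t => t.foldl PySem.Int.bxor h

-- the running-argmin loop step: 'if match < abjunct: abjunct = match; opts = []' then
-- 'if match == abjunct: opts.append(i)'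
def nimwinStep (sub : Int) (st : Int × List Int) (ip : Int × Int) : Int × List Int :=
  let m := PySem.Int.band sub (Int.not ip.2)
  let st := if m < st.1 then (m, ([] : List Int)) else st
  if m = st.1 then (st.1, st.2 ++ [ip.1]) else st

def nimwin (piles : List Int) (misere : Bool) : Int × List Int :=
  -- endgame = sum(1 for p in piles if p > 1) <= 1
  let endgame : Bool := decide ((piles.countP (fun p => decide (1 < p))) ≤ 1)
  -- misere as Python's bool/int value: False→0, True→1, -1 after the parity correction
  let mi : Int :=
    if misere && endgame then
      if (piles.countP (fun p => decide (0 < p))) % 2 = 1 then -1 else 1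
    else 0
  let sub : Int := pyReduceXor piles
  if sub + mi ≠ 0 then
    let st := (PySem.List.enumerate piles 0).foldl (nimwinStep sub) (sub, [])
    (sub - 2 * st.1 + mi, st.2)
  else
    (sub + mi, [])

-- ===== PORT B =====
def nimwin_alt (piles : List Int) (misere : Bool) : Int × List Int :=
  let endgame : Bool := decide ((piles.countP (fun p => decide (1 < p))) ≤ 1)
  let mi : Int :=
    if misere && endgame then
      if (piles.countP (fun p => decide (0 < p))) % 2 = 1 then -1 else 1
    else 0
  let sub : Int := pyReduceXor piles
  if sub + mi ≠ 0 then
    let cands := piles.map (fun p => PySem.Int.band sub (Int.not p))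
    -- m = min([sub] + matches): the builtin min of a list seeded with sub
    let m := cands.foldl min sub
    let opts := (PySem.List.enumerate cands 0).filterMap
      (fun ix => if ix.2 = m then some ix.1 else none)
    (sub - 2 * m + mi, opts)
  else
    (sub + mi, [])

-- ===== PRECONDITION & SPEC =====
-- Pre_ excludes only the empty tuple, on which A's reduce raises TypeError.
def Pre_nimwin (piles : List Int) (misere : Bool) : Prop := piles ≠ []
instance (piles : List Int) (misere : Bool) : Decidable (Pre_nimwin piles misere) := by unfold Pre_nimwin; infer_instance
def pvWitness_nimwin : List Int × Bool := ([4, 2, 1], false)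

def Spec_nimwin (piles : List Int) (misere : Bool) (out : Int × List Int) : Prop := out = nimwin_alt piles misere
instance (piles : List Int) (misere : Bool) (out : Int × List Int) : Decidable (Spec_nimwin piles misere out) := by unfold Spec_nimwin; infer_instance

-- ===== CLAIM (what is proved, stated in full; the proofs are below) =====
def Claim_equal_nimwin : Prop := ∀ (piles : List Int) (misere : Bool), Dom_nimwin piles misere → Pre_nimwin piles misere → Spec_nimwin piles misere (nimwin piles misere)

-- ===== LEMMAS AND PROOFS =====

-- the minimum A's loop maintains, over the enumerated list
def nimwinMin (sub : Int) (a : Int) (l : List (Int × Int)) : Int :=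
  l.foldl (fun m ip => min m (PySem.Int.band sub (Int.not ip.2))) a

-- the indices l contributes once the final minimum mn is known
def nimwinIdx (sub mn : Int) (l : List (Int × Int)) : List Int :=
  l.filterMap (fun ip => if PySem.Int.band sub (Int.not ip.2) = mn then some ip.1 else none)

theorem nimwinMin_le (sub a : Int) (l : List (Int × Int)) : nimwinMin sub a l ≤ a := by
  induction l generalizing a with
  | nil => simp [nimwinMin]
  | cons x t ih =>
      calc nimwinMin sub a (x :: t) ≤ min a _ := ih _
      _ ≤ a := min_le_left _ _

-- invariant of A's loop: it computes the running minimum together with the indices that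
-- attain it; the accumulator survives exactly when the minimum never drops below a
theorem nimwin_loop_inv (sub : Int) (l : List (Int × Int)) (a : Int) (acc : List Int) :
    l.foldl (nimwinStep sub) (a, acc) =
      (nimwinMin sub a l,
        (if nimwinMin sub a l = a then acc else []) ++ nimwinIdx sub (nimwinMin sub a l) l) := by
  induction l generalizing a acc with
  | nil => simp [nimwinMin, nimwinIdx]
  | cons ip t ih =>
      obtain ⟨i, p⟩ := ip
      have hmin : nimwinMin sub a ((i, p) :: t) =
          nimwinMin sub (min a (PySem.Int.band sub (Int.not p))) t := by
        simp [nimwinMin]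
      have hidx : ∀ mn : Int, nimwinIdx sub mn ((i, p) :: t) =
          (if PySem.Int.band sub (Int.not p) = mn then [i] else []) ++ nimwinIdx sub mn t := by
        intro mn
        by_cases hc : PySem.Int.band sub (Int.not p) = mn
        · simp [nimwinIdx, hc]
        · simp [nimwinIdx, hc]
      have hstep : nimwinStep sub (a, acc) (i, p) =
          if PySem.Int.band sub (Int.not p) < a then (PySem.Int.band sub (Int.not p), [i])
          else if PySem.Int.band sub (Int.not p) = a then (a, acc ++ [i]) else (a, acc) := by
        simp only [nimwinStep]
        rcases lt_trichotomy (PySem.Int.band sub (Int.not p)) a with h | h | h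
        · simp [h]
        · simp [h]
        · simp [not_lt_of_gt h, (ne_of_gt h)]
      rw [List.foldl_cons, hstep, hmin, hidx]
      rcases lt_trichotomy (PySem.Int.band sub (Int.not p)) a with h | h | h
      · -- strict drop: accumulator reset to [i]
        rw [if_pos h, ih]
        have hm : min a (PySem.Int.band sub (Int.not p)) = PySem.Int.band sub (Int.not p) :=
          min_eq_right h.le
        have hne : nimwinMin sub (PySem.Int.band sub (Int.not p)) t ≠ a := by
          have := nimwinMin_le sub (PySem.Int.band sub (Int.not p)) t; omega
        rw [hm]
        by_cases he : nimwinMin sub (PySem.Int.band sub (Int.not p)) t =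
            PySem.Int.band sub (Int.not p)
        · simp [he, ne_of_lt h]
        · simp [he, hne, Ne.symm he]
      · -- tie with the current minimum: i appended
        rw [if_neg (lt_irrefl _ ∘ (h ▸ ·)), if_pos h, ih]
        have hm : min a (PySem.Int.band sub (Int.not p)) = a := by rw [h, min_self]
        rw [hm]
        by_cases he : nimwinMin sub a t = a
        · simp [he, h]
        · simp [he, h, Ne.symm he]
      · -- above the current minimum: no change
        rw [if_neg (not_lt_of_gt h), if_neg (ne_of_gt h), ih]
        have hm : min a (PySem.Int.band sub (Int.not p)) = a := min_eq_left h.le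
        have hne : PySem.Int.band sub (Int.not p) ≠ nimwinMin sub a t := by
          have := nimwinMin_le sub a t; omega
        rw [hm]
        by_cases he : nimwinMin sub a t = a
        · simp [he, ne_of_gt h]
        · simp [he, hne]

theorem enumerate_map (f : Int → Int) (xs : List Int) (s : Int) :
    PySem.List.enumerate (xs.map f) s =
      (PySem.List.enumerate xs s).map (fun ip => (ip.1, f ip.2)) := by
  induction xs generalizing s with
  | nil => simp [PySem.List.enumerate_nil]
  | cons x t ih => simp [PySem.List.enumerate_cons, ih]

-- B's minimum (fold of min over the matches, seeded with sub) equals A's loop minimum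
theorem min_matches_eq (sub : Int) (piles : List Int) (a s : Int) :
    (piles.map (fun p => PySem.Int.band sub (Int.not p))).foldl min a =
      nimwinMin sub a (PySem.List.enumerate piles s) := by
  induction piles generalizing a s with
  | nil => simp [nimwinMin, PySem.List.enumerate_nil]
  | cons p t ih =>
      simp only [List.map_cons, List.foldl_cons, PySem.List.enumerate_cons, nimwinMin] at *
      exact ih _ _

-- B's index pass over enumerate(matches) equals A's nimwinIdx over enumerate(piles)
theorem idx_matches_eq (sub mn : Int) (piles : List Int) (s : Int) :
    (PySem.List.enumerate (piles.map (fun p => PySem.Int.band sub (Int.not p))) s).filterMap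
        (fun ix => if ix.2 = mn then some ix.1 else none) =
      nimwinIdx sub mn (PySem.List.enumerate piles s) := by
  rw [enumerate_map, List.filterMap_map]
  rfl

theorem nimwin_eq_alt (piles : List Int) (misere : Bool) :
    nimwin piles misere = nimwin_alt piles misere := by
  unfold nimwin nimwin_alt
  by_cases hc : pyReduceXor piles +
      (if misere && decide ((piles.countP (fun p => decide (1 < p))) ≤ 1) then
        if (piles.countP (fun p => decide (0 < p))) % 2 = 1 then -1 else 1
      else 0) ≠ 0
  · simp only [if_pos hc, nimwin_loop_inv, idx_matches_eq, ite_self, List.nil_append]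
    rw [min_matches_eq (pyReduceXor piles) piles (pyReduceXor piles) 0]
  · simp only [if_neg hc]

-- ===== VERDICT (by name: the statement is the Claim_ definition above) =====
theorem nimwin_spec : Claim_equal_nimwin := by
  intro piles misere _ _
  unfold Spec_nimwin
  exact nimwin_eq_alt piles misere
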